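-- pv_equiv track=rewrite | github.com/ggchappell/AdventOfCode2021 | day14/solve-14b.py | least_most
-- ===== SOURCE A (Python) =====
-- import collections  # .defaultdict
--
-- def least_most(pp):
--     # The number of times a letter appears is the number of times a pair
--     # holding it appears, plus 1 if the letter is the first or last in
--     # the template, divided by 2. This should be the same as the number
--     # of times a pait containing it appears, rounded up to the nearest
--     # even integer, divided by 2.
--     quants = collections.defaultdict(int)
--     for cc in pp:
--         quants[cc[0]] += pp[cc]
--         quants[cc[1]] += pp[cc]
--     for cc in quants:
--         q = quants[cc]
--         if q % 2 == 1:
--             q += 1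
--         quants[cc] = q // 2
--     c1 = min(quants, key = (lambda c: quants[c]))
--     c2 = max(quants, key = (lambda c: quants[c]))
--     return c1, quants[c1], c2, quants[c2]
-- ===== SOURCE B (Python) =====
-- def least_most(pp):
--     # No counting dict at all: collect the distinct letters in first-seen
--     # order, compute each letter's rounded count by a direct scan over the
--     # pair list, and keep a running first-wins minimum and maximum.
--     items = list(pp.items())
--     letters = []
--     for k, _ in items:
--         for c in (k[0], k[1]):
--             if c not in letters:
--                 letters.append(c)
--
--     def q(c):
--         t = 0
--         for k, v in items:
--             if k[0] == c:
--                 t += v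
--             if k[1] == c:
--                 t += v
--         return (t + 1) // 2
--
--     minc = maxc = letters[0]
--     minv = maxv = q(minc)
--     for c in letters[1:]:
--         v = q(c)
--         if v < minv:
--             minc, minv = c, v
--         if v > maxv:
--             maxc, maxv = c, v
--     return minc, minv, maxc, maxv
-- ===== Notes on version B (the rewrite author's own statement) =====
-- stated objective: alternative
-- what changed: B drops A's counting dict entirely: it builds the distinct-letter list in first-seen order, computes each letter's rounded count (t+1)//2 by a direct scan over the pair list, and picks min and max in one running first-wins pass, instead of A's defaultdict tally + in-place halving loop + two min/max(key=) scans.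
import Mathlib
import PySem

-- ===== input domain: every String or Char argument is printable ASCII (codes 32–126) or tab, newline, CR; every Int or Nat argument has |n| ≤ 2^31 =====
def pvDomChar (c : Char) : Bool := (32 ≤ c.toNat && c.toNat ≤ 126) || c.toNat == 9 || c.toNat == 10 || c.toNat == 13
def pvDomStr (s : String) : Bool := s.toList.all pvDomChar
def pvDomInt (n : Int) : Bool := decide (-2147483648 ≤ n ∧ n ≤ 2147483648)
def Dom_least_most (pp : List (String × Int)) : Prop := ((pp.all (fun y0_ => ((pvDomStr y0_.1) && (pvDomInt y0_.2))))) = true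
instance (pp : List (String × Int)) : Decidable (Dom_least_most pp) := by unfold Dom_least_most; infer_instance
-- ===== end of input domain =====

-- B drops A's counting dict: it collects the distinct letters in first-seen order,
-- computes each letter's rounded count by a direct scan over the pair list, and
-- picks min and max in one running first-wins pass (alternative algorithm, no dict).


-- ===== PORT A =====
-- literal port of A: defaultdict counting loop over the pairs, an in-place halving
-- loop over the dict, then min(…, key=…) and max(…, key=…) over the keys.
def least_most (pp : List (String × Int)) : String × Int × String × Int :=
  let d := PySem.Dict.ofList pp
  let quants : PySem.Dict Char Int :=
    d.items.foldl
      (fun q kv =>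
        (q.modify (kv.1.toList.getD 0 ' ') 0 (· + kv.2)).modify (kv.1.toList.getD 1 ' ') 0 (· + kv.2))
      PySem.Dict.empty
  let quants2 : PySem.Dict Char Int :=
    quants.keys.foldl
      (fun q c =>
        let v := q.getD c 0
        let v := if PySem.Int.mod v 2 = 1 then v + 1 else v
        q.insert c (PySem.Int.floordiv v 2))
      quants
  match PySem.List.min? quants2.keys (fun c => quants2.getD c 0),
        PySem.List.max? quants2.keys (fun c => quants2.getD c 0) with
  | some c1, some c2 => (String.ofList [c1], quants2.getD c1 0, String.ofList [c2], quants2.getD c2 0)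
  | _, _ => ("", 0, "", 0)

-- ===== PORT B =====
-- literal port of B: distinct letters in first-seen order (a list grown with an
-- append-if-absent test = PySem.Set.add), a per-letter total computed by a direct
-- scan over the pair list, and one running first-wins min/max pass over the letters.
def least_most_alt (pp : List (String × Int)) : String × Int × String × Int :=
  let items := (PySem.Dict.ofList pp).items
  let letters : PySem.Set Char :=
    items.foldl
      (fun L kv =>
        PySem.Set.add (PySem.Set.add L (kv.1.toList.getD 0 ' ')) (kv.1.toList.getD 1 ' '))
      []
  let q : Char → Int := fun c =>
    PySem.Int.floordiv
      ((items.foldl (fun t kv =>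
          let t := if kv.1.toList.getD 0 ' ' = c then t + kv.2 else t
          if kv.1.toList.getD 1 ' ' = c then t + kv.2 else t) 0) + 1) 2
  match letters with
  | [] => ("", 0, "", 0)
  | x :: rest =>
    let r := rest.foldl
      (fun (acc : Char × Int × Char × Int) c =>
        let v := q c
        let acc1 := if v < acc.2.1 then (c, v, acc.2.2.1, acc.2.2.2) else acc
        if acc1.2.2.2 < v then (acc1.1, acc1.2.1, c, v) else acc1)
      (x, q x, x, q x)
    (String.ofList [r.1], r.2.1, String.ofList [r.2.2.1], r.2.2.2)

-- ===== PRECONDITION & SPEC =====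
-- Pre_ excludes exactly the inputs where A raises: an empty dict (min() of an empty
-- sequence is a ValueError) and any key shorter than two characters (cc[1] is an IndexError).
def Pre_least_most (pp : List (String × Int)) : Prop :=
  pp ≠ [] ∧ ∀ p ∈ pp, 2 ≤ p.1.toList.length
instance (pp : List (String × Int)) : Decidable (Pre_least_most pp) := by
  unfold Pre_least_most; infer_instance

def pvWitness_least_most : (List (String × Int)) := [("AB", 3), ("BB", 2)]

def Spec_least_most (pp : List (String × Int)) (out : String × Int × String × Int) : Prop := out = least_most_alt pp
instance (pp : List (String × Int)) (out : String × Int × String × Int) : Decidable (Spec_least_most pp out) := by unfold Spec_least_most; infer_instance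

-- ===== CLAIM (what is proved, stated in full; the proofs are below) =====
def Claim_equal_least_most : Prop := ∀ (pp : List (String × Int)), Dom_least_most pp → Pre_least_most pp → Spec_least_most pp (least_most pp)

-- ===== LEMMAS AND PROOFS =====

-- A's counting loop (the quants dict before the halving pass)
def pvBuild (pp : List (String × Int)) : PySem.Dict Char Int :=
  (PySem.Dict.ofList pp).items.foldl
    (fun q kv =>
      (q.modify (kv.1.toList.getD 0 ' ') 0 (· + kv.2)).modify (kv.1.toList.getD 1 ' ') 0 (· + kv.2))
    PySem.Dict.empty

-- A's per-letter transform
def pvG (v : Int) : Int :=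
  PySem.Int.floordiv (if PySem.Int.mod v 2 = 1 then v + 1 else v) 2

theorem pvG_eq (v : Int) : pvG v = PySem.Int.floordiv (v + 1) 2 := by
  unfold pvG
  rw [PySem.Int.mod_eq_emod_of_pos (by omega), PySem.Int.floordiv_eq_ediv_of_pos (by omega),
      PySem.Int.floordiv_eq_ediv_of_pos (by omega)]
  split_ifs with h <;> omega

-- the per-item contribution of a pair to letter c
def pvW (c : Char) (kv : String × Int) : Int :=
  (if kv.1.toList.getD 0 ' ' = c then kv.2 else 0) + (if kv.1.toList.getD 1 ' ' = c then kv.2 else 0)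

-- the counting loop's lookups: getD of the modify-modify fold is the contribution sum
theorem pvGetD_build (l : List (String × Int)) (d : PySem.Dict Char Int) (c : Char) :
    (l.foldl
      (fun q kv =>
        (q.modify (kv.1.toList.getD 0 ' ') 0 (· + kv.2)).modify (kv.1.toList.getD 1 ' ') 0 (· + kv.2))
      d).getD c 0 = d.getD c 0 + (l.map (pvW c)).sum := by
  induction l generalizing d with
  | nil => simp
  | cons kv xs ih =>
    simp only [List.foldl_cons, List.map_cons, List.sum_cons]
    rw [ih]
    have h1 := PySem.Dict.getD_modify (d.modify (kv.1.toList.getD 0 ' ') 0 (· + kv.2))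
      (kv.1.toList.getD 1 ' ') c 0 (· + kv.2)
    have h3 := PySem.Dict.getD_modify d (kv.1.toList.getD 0 ' ') (kv.1.toList.getD 1 ' ') 0 (· + kv.2)
    have h2 := PySem.Dict.getD_modify d (kv.1.toList.getD 0 ' ') c 0 (· + kv.2)
    rw [h1, h3, h2]
    unfold pvW
    generalize kv.1.toList.getD 0 ' ' = a at *
    generalize kv.1.toList.getD 1 ' ' = b at *
    by_cases hcb : c = b
    · subst hcb
      by_cases hca : c = a
      · subst hca; simp; ring
      · simp [hca, Ne.symm hca]; ring
    · by_cases hca : c = a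
      · subst hca
        simp [hcb, Ne.symm hcb]; ring
      · simp [hca, hcb, Ne.symm hca, Ne.symm hcb]

-- the counting loop's keys: the modify-modify fold grows keys exactly as B grows letters
theorem pvKeys_modify_add {κ ν : Type} [BEq κ] [LawfulBEq κ] (d : PySem.Dict κ ν)
    (k : κ) (d0 : ν) (f : ν → ν) :
    (d.modify k d0 f).keys = PySem.Set.add d.keys k := by
  rw [PySem.Dict.keys_modify]
  by_cases h : d.contains k = true
  · rw [PySem.Dict.keys_insert_of_contains _ _ h]
    have hm : k ∈ d.keys := (PySem.Dict.contains_iff_mem_keys d k).mp h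
    simp [PySem.Set.add, PySem.Set.contains, hm]
  · rw [PySem.Dict.keys_insert_of_not_contains _ _ (by simpa using h)]
    have hm : k ∉ d.keys := fun hc => h ((PySem.Dict.contains_iff_mem_keys d k).mpr hc)
    simp [PySem.Set.add, PySem.Set.contains, hm]

theorem pvKeys_build (l : List (String × Int)) (d : PySem.Dict Char Int) :
    (l.foldl
      (fun q kv =>
        (q.modify (kv.1.toList.getD 0 ' ') 0 (· + kv.2)).modify (kv.1.toList.getD 1 ' ') 0 (· + kv.2))
      d).keys
    = l.foldl
        (fun L kv =>
          PySem.Set.add (PySem.Set.add L (kv.1.toList.getD 0 ' ')) (kv.1.toList.getD 1 ' '))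
        d.keys := by
  induction l generalizing d with
  | nil => rfl
  | cons kv xs ih =>
    simp only [List.foldl_cons]
    rw [ih, pvKeys_modify_add, pvKeys_modify_add]

-- B's per-letter scan is the contribution sum too
theorem pvScan_eq (l : List (String × Int)) (c : Char) :
    l.foldl (fun t kv =>
        let t := if kv.1.toList.getD 0 ' ' = c then t + kv.2 else t
        if kv.1.toList.getD 1 ' ' = c then t + kv.2 else t) 0
    = (l.map (pvW c)).sum := by
  have h : l.foldl (fun t kv =>
        let t := if kv.1.toList.getD 0 ' ' = c then t + kv.2 else t
        if kv.1.toList.getD 1 ' ' = c then t + kv.2 else t) 0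
      = l.foldl (fun t kv => t + pvW c kv) 0 := by
    apply PySem.List.foldl_congr_mem
    intro acc kv _
    unfold pvW
    split_ifs <;> ring
  rw [h, PySem.List.foldl_add]
  simp

-- first-wins running minimum / maximum over chars with a key function
def pvMinC (f : Char → Int) (a : Char) (l : List Char) : Char :=
  l.foldl (fun b c => if f c < f b then c else b) a
def pvMaxC (f : Char → Int) (a : Char) (l : List Char) : Char :=
  l.foldl (fun b c => if f b < f c then c else b) a

theorem pvMin?_cons (f : Char → Int) (x : Char) (rest : List Char) :
    PySem.List.min? (x :: rest) f = some (pvMinC f x rest) := by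
  show List.foldl _ none (x :: rest) = _
  rw [List.foldl_cons]
  show List.foldl _ (some x) rest = _
  induction rest generalizing x with
  | nil => rfl
  | cons y ys ih =>
    simp only [List.foldl_cons, pvMinC]
    by_cases h : f y < f x <;> simp only [h, if_true, if_false] <;>
      exact ih _

theorem pvMax?_cons (f : Char → Int) (x : Char) (rest : List Char) :
    PySem.List.max? (x :: rest) f = some (pvMaxC f x rest) := by
  show List.foldl _ none (x :: rest) = _
  rw [List.foldl_cons]
  show List.foldl _ (some x) rest = _
  induction rest generalizing x with
  | nil => rfl
  | cons y ys ih =>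
    simp only [List.foldl_cons, pvMaxC]
    by_cases h : f x < f y <;> simp only [h, if_true, if_false] <;>
      exact ih _

-- B's combined fold computes both running bests at once
theorem pvComb_fold (f : Char → Int) (l : List Char) (a b : Char) :
    l.foldl
      (fun (acc : Char × Int × Char × Int) c =>
        let v := f c
        let acc1 := if v < acc.2.1 then (c, v, acc.2.2.1, acc.2.2.2) else acc
        if acc1.2.2.2 < v then (acc1.1, acc1.2.1, c, v) else acc1)
      (a, f a, b, f b)
    = (pvMinC f a l, f (pvMinC f a l), pvMaxC f b l, f (pvMaxC f b l)) := by
  induction l generalizing a b with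
  | nil => simp [pvMinC, pvMaxC]
  | cons x xs ih =>
    simp only [List.foldl_cons]
    have hm : pvMinC f a (x :: xs) = pvMinC f (if f x < f a then x else a) xs := by
      simp [pvMinC]
    have hM : pvMaxC f b (x :: xs) = pvMaxC f (if f b < f x then x else b) xs := by
      simp [pvMaxC]
    rw [hm, hM]
    by_cases h1 : f x < f a <;> by_cases h2 : f b < f x <;>
      simp only [h1, h2, if_true, if_false] <;>
      simpa [h1, h2] using ih _ _

-- inserting never empties a dict
theorem pvInsert_ne_nil {κ ν : Type} [BEq κ] (d : PySem.Dict κ ν) (k : κ) (v : ν) :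
    (d.insert k v).items ≠ [] := by
  by_cases h : d.contains k
  · rw [PySem.Dict.items_insert_of_contains d v h]
    intro hc
    have : d.items = [] := by simpa using congrArg List.length hc
    simp [PySem.Dict.contains, this] at h
  · simp [PySem.Dict.insert, h]

theorem pvFoldIns_ne_nil (ys : List (String × Int)) (d : PySem.Dict String Int)
    (h : d.items ≠ []) :
    (ys.foldl (fun acc p => acc.insert p.1 p.2) d).items ≠ [] := by
  induction ys generalizing d with
  | nil => exact h
  | cons y ys ih =>
    simp only [List.foldl_cons]
    exact ih _ (pvInsert_ne_nil _ _ _)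

theorem pvOfList_ne_nil (pp : List (String × Int)) (h : pp ≠ []) :
    (PySem.Dict.ofList pp).items ≠ [] := by
  obtain ⟨x, xs, rfl⟩ := List.exists_cons_of_ne_nil h
  show ((xs.foldl (fun acc p => acc.insert p.1 p.2)
      ((PySem.Dict.empty : PySem.Dict String Int).insert x.1 x.2))).items ≠ []
  exact pvFoldIns_ne_nil xs _ (pvInsert_ne_nil _ _ _)

theorem pvFoldBuild_ne_nil (ys : List (String × Int)) (d : PySem.Dict Char Int)
    (h : d.items ≠ []) :
    (ys.foldl
      (fun q kv =>
        (q.modify (kv.1.toList.getD 0 ' ') 0 (· + kv.2)).modify (kv.1.toList.getD 1 ' ') 0 (· + kv.2))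
      d).items ≠ [] := by
  induction ys generalizing d with
  | nil => exact h
  | cons y ys ih =>
    simp only [List.foldl_cons]
    exact ih _ (pvInsert_ne_nil _ _ _)

theorem pvBuild_ne_nil (pp : List (String × Int)) (h : pp ≠ []) :
    (pvBuild pp).items ≠ [] := by
  unfold pvBuild
  obtain ⟨x, xs, hx⟩ := List.exists_cons_of_ne_nil (pvOfList_ne_nil pp h)
  rw [hx]
  simp only [List.foldl_cons]
  exact pvFoldBuild_ne_nil xs _ (pvInsert_ne_nil _ _ _)

theorem pvBuild_nodup (pp : List (String × Int)) : (pvBuild pp).keys.Nodup := by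
  unfold pvBuild
  generalize (PySem.Dict.ofList pp).items = l
  have h0 : (PySem.Dict.empty : PySem.Dict Char Int).keys.Nodup := by
    simp [PySem.Dict.empty, PySem.Dict.keys]
  generalize (PySem.Dict.empty : PySem.Dict Char Int) = d at h0 ⊢
  induction l generalizing d with
  | nil => exact h0
  | cons x xs ih =>
    exact ih _ (PySem.Dict.nodup_keys_insert _ _ _ (PySem.Dict.nodup_keys_insert _ _ _ h0))

-- A's in-place halving loop over the keys maps pvG over the values
theorem pvTransform (l₂ l₁ : List (Char × Int))
    (h : ((l₁ ++ l₂).map Prod.fst).Nodup) :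
    (l₂.map Prod.fst).foldl
      (fun q c => q.insert c (pvG (q.getD c 0)))
      (PySem.Dict.mk (l₁ ++ l₂))
    = PySem.Dict.mk (l₁ ++ l₂.map (fun p => (p.1, pvG p.2))) := by
  induction l₂ generalizing l₁ with
  | nil => rfl
  | cons x xs ih =>
    obtain ⟨c, v⟩ := x
    have hc1 : ∀ p ∈ l₁, p.1 ≠ c := by
      intro p hp hpc
      have hh := h
      rw [List.map_append, List.nodup_append] at hh
      have m1 : p.1 ∈ l₁.map Prod.fst := List.mem_map_of_mem hp
      have m2 : p.1 ∈ ((c, v) :: xs).map Prod.fst := by rw [hpc]; simp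
      exact hh.2.2 p.1 m1 p.1 m2 rfl
    have hc2 : ∀ p ∈ xs, p.1 ≠ c := by
      intro p hp hpc
      have hh := h
      rw [List.map_append, List.nodup_append] at hh
      have h2 := hh.2.1
      simp only [List.map_cons, List.nodup_cons] at h2
      exact h2.1 (by rw [← hpc]; exact List.mem_map_of_mem hp)
    have hget : (PySem.Dict.mk (l₁ ++ (c, v) :: xs)).getD c 0 = v := by
      simp only [PySem.Dict.getD, PySem.Dict.get?]
      rw [List.find?_append]
      have h1 : l₁.find? (fun p => p.1 == c) = none := by
        rw [List.find?_eq_none]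
        intro p hp
        simp [hc1 p hp]
      simp [h1]
    have hcont : (PySem.Dict.mk (l₁ ++ (c, v) :: xs)).contains c = true := by
      simp [PySem.Dict.contains]
    have hins : (PySem.Dict.mk (l₁ ++ (c, v) :: xs)).insert c (pvG v)
        = PySem.Dict.mk ((l₁ ++ [(c, pvG v)]) ++ xs) := by
      apply PySem.Dict.ext
      rw [PySem.Dict.items_insert_of_contains _ _ hcont]
      show (l₁ ++ (c, v) :: xs).map (fun p => if (p.1 == c) = true then (c, pvG v) else p)
          = (l₁ ++ [(c, pvG v)]) ++ xs
      rw [List.map_append, List.map_cons, List.append_assoc]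
      congr 1
      · exact (List.map_congr_left (fun p hp => by simp [hc1 p hp])).trans (List.map_id l₁)
      · rw [List.singleton_append]
        congr 1
        · simp
        · exact (List.map_congr_left (fun p hp => by simp [hc2 p hp])).trans (List.map_id xs)
    simp only [List.map_cons, List.foldl_cons, hget, hins]
    have h' : (((l₁ ++ [(c, pvG v)]) ++ xs).map Prod.fst).Nodup := by
      simpa using h
    have := ih (l₁ ++ [(c, pvG v)]) h'
    rw [this]
    simp

-- the value-mapped dict looks up as pvG of the original lookup (pvG 0 = 0 covers misses)
theorem pvGetD_mapG (l : List (Char × Int)) (c : Char) :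
    (PySem.Dict.mk (l.map (fun p => (p.1, pvG p.2)))).getD c 0
      = pvG ((PySem.Dict.mk l).getD c 0) := by
  simp only [PySem.Dict.getD, PySem.Dict.get?, List.find?_map]
  have hp : (fun (p : Char × Int) => p.1 == c) ∘ (fun p => (p.1, pvG p.2))
      = fun (p : Char × Int) => p.1 == c := rfl
  rw [hp]
  cases h : l.find? (fun p => p.1 == c) with
  | none => simp [pvG]
  | some p => simp

-- A's halving loop, on the counting dict
def pvTrans (pp : List (String × Int)) : PySem.Dict Char Int :=
  (pvBuild pp).keys.foldl (fun q c => q.insert c (pvG (q.getD c 0))) (pvBuild pp)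

-- ===== VERDICT (by name: the statement is the Claim_ definition above) =====
theorem least_most_spec : Claim_equal_least_most := by
  intro pp _ hpre
  obtain ⟨hne, _⟩ := hpre
  unfold Spec_least_most
  -- both ports, written over the shared pieces (definitional unfoldings)
  have hA : least_most pp =
      (match PySem.List.min? (pvTrans pp).keys (fun c => (pvTrans pp).getD c 0),
             PySem.List.max? (pvTrans pp).keys (fun c => (pvTrans pp).getD c 0) with
       | some c1, some c2 =>
           (String.ofList [c1], (pvTrans pp).getD c1 0, String.ofList [c2], (pvTrans pp).getD c2 0)
       | _, _ => ("", 0, "", 0)) := rfl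
  set items := (PySem.Dict.ofList pp).items with hitems
  set qB : Char → Int := fun c =>
    PySem.Int.floordiv
      ((items.foldl (fun t kv =>
          let t := if kv.1.toList.getD 0 ' ' = c then t + kv.2 else t
          if kv.1.toList.getD 1 ' ' = c then t + kv.2 else t) 0) + 1) 2 with hqB
  have hB : least_most_alt pp =
      (match items.foldl
          (fun L kv =>
            PySem.Set.add (PySem.Set.add L (kv.1.toList.getD 0 ' ')) (kv.1.toList.getD 1 ' '))
          [] with
       | [] => ("", 0, "", 0)
       | x :: rest =>
         let r := rest.foldl
           (fun (acc : Char × Int × Char × Int) c =>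
             let v := qB c
             let acc1 := if v < acc.2.1 then (c, v, acc.2.2.1, acc.2.2.2) else acc
             if acc1.2.2.2 < v then (acc1.1, acc1.2.1, c, v) else acc1)
           (x, qB x, x, qB x)
         (String.ofList [r.1], r.2.1, String.ofList [r.2.2.1], r.2.2.2)) := rfl
  -- A's transformed dict is the value-mapped counting dict
  have hnodup : ((pvBuild pp).items.map Prod.fst).Nodup := pvBuild_nodup pp
  have htr : pvTrans pp = PySem.Dict.mk ((pvBuild pp).items.map (fun p => (p.1, pvG p.2))) := by
    unfold pvTrans
    have := pvTransform (pvBuild pp).items [] (by simpa using hnodup)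
    simp only [List.nil_append] at this
    rw [show (pvBuild pp).keys = (pvBuild pp).items.map Prod.fst from rfl,
        show (pvBuild pp : PySem.Dict Char Int) = PySem.Dict.mk (pvBuild pp).items from rfl,
        this]
  -- A's key function equals B's q, everywhere
  have hfq : (fun c => (pvTrans pp).getD c 0) = qB := by
    funext c
    rw [htr, pvGetD_mapG, hqB]
    show pvG ((pvBuild pp).getD c 0) = _
    have hb : (pvBuild pp).getD c 0 = (items.map (pvW c)).sum := by
      unfold pvBuild
      rw [← hitems, pvGetD_build, PySem.Dict.getD_empty]
      ring
    rw [hb, pvG_eq]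
    simp only [pvScan_eq]
  -- A's keys and B's letters are the same list
  have hkT : (pvTrans pp).keys = (pvBuild pp).keys := by
    rw [htr]
    show ((pvBuild pp).items.map _).map Prod.fst = (pvBuild pp).items.map Prod.fst
    rw [List.map_map]
    rfl
  have hkB : (pvBuild pp).keys
      = items.foldl
          (fun L kv =>
            PySem.Set.add (PySem.Set.add L (kv.1.toList.getD 0 ' ')) (kv.1.toList.getD 1 ' '))
          [] := by
    unfold pvBuild
    rw [← hitems, pvKeys_build]
    rfl
  -- the shared key list is nonempty
  obtain ⟨x, rest, hx⟩ : ∃ x rest, (pvBuild pp).keys = x :: rest := by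
    have h1 : (pvBuild pp).keys ≠ [] := by
      intro hc
      exact pvBuild_ne_nil pp hne (by simpa [PySem.Dict.keys] using congrArg List.length hc)
    obtain ⟨x, rest, hxr⟩ := List.exists_cons_of_ne_nil h1
    exact ⟨x, rest, hxr⟩
  rw [hA, hB, ← hkB, hx, hfq, hkT, hx, pvMin?_cons, pvMax?_cons]
  simp only [pvComb_fold]
  rw [show (pvTrans pp).getD (pvMinC qB x rest) 0 = qB (pvMinC qB x rest) from congrFun hfq _,
      show (pvTrans pp).getD (pvMaxC qB x rest) 0 = qB (pvMaxC qB x rest) from congrFun hfq _]
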